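-- pv_equiv track=rewrite | github.com/Leeeunsookl/esp-dialogue-site | docs/webapp.py | filter_memory_by_keywords
-- ===== SOURCE A (Python) =====
-- from typing import List, Optional
--
-- def filter_memory_by_keywords(memory: List[str], kws: List[str]) -> List[str]:
--     if not kws: return memory
--     scored = []
--     for s in memory:
--         score = sum(1 for k in kws if k in s.lower())
--         if score > 0: scored.append((score, s))
--     if not scored: return memory
--     scored.sort(key=lambda x: (-x[0], len(x[1])))
--     return [s for _, s in scored[:100]]
-- ===== SOURCE B (Python) =====
-- from typing import List
--
--
-- def filter_memory_by_keywords(memory: List[str], kws: List[str]) -> List[str]: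
--     if not kws:
--         return memory
--     # one pass: bucket each matching string by its score (1..len(kws))
--     buckets = [[] for _ in range(len(kws) + 1)]
--     matched = 0
--     for s in memory:
--         low = s.lower()
--         score = sum(1 for k in kws if k in low)
--         if score > 0:
--             buckets[score].append(s)
--             matched += 1
--     if matched == 0:
--         return memory
--     # highest score first; inside a bucket a stable sort by length
--     ranked = []
--     for v in range(len(kws), 0, -1):
--         ranked.extend(sorted(buckets[v], key=len))
--     return ranked[:100]
-- ===== Notes on version B (the rewrite author's own statement) =====
-- stated objective: alternative
-- what changed: Replaces the global stable sort by the tuple key (-score, len) with score buckets filled in one pass, emitted from highest score down with a per-bucket stable sort by length (a bucket/pigeonhole decomposition of the ranking).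
import Mathlib
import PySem

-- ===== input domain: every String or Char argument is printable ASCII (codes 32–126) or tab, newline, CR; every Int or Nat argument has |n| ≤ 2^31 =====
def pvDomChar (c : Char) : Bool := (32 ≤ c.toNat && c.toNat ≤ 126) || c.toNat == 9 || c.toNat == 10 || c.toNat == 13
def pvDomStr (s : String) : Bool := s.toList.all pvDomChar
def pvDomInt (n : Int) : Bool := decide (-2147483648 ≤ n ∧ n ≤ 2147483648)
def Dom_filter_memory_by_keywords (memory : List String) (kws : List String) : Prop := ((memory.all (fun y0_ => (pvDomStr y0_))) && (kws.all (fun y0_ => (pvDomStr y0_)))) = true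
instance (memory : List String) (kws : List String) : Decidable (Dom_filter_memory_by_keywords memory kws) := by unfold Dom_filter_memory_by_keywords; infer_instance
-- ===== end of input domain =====

-- B replaces A's global stable sort by the key (-score, len) with one-pass score buckets,
-- emitted from highest score down with a per-bucket stable sort by length (return value proved equal).


-- ===== PORT A =====
def filter_memory_by_keywords (memory : List String) (kws : List String) : List String :=
  if kws = [] then memory
  else
    let scored : List (Int × String) :=
      memory.foldl (fun acc s =>
        let score : Int := kws.foldl (fun c k =>
          if PySem.Str.isIn k (PySem.Str.lower s) then c + 1 else c) 0
        if score > 0 then acc ++ [(score, s)] else acc) []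
    if scored = [] then memory
    else
      let srt := PySem.List.sorted2 scored (fun x => -x.1) (fun x => PySem.Str.len x.2)
      (PySem.List.slice srt none (some 100)).map (fun p => p.2)

-- ===== PORT B =====
-- B: one pass bucketing each matching string by its score, then highest score first with a
-- per-bucket stable sort by length.  buckets[score] is indexed with getD/toNat: the index is
-- always in range (0 < score <= len kws), where Python's buckets[score] would also succeed.
def filter_memory_by_keywords_alt (memory : List String) (kws : List String) : List String :=
  if kws = [] then memory
  else
    let st := memory.foldl (fun (st : List (List String) × Int) s =>
        let low := PySem.Str.lower s
        let score : Int := kws.foldl (fun c k => if PySem.Str.isIn k low then c + 1 else c) 0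
        if score > 0 then
          (st.1.set score.toNat (st.1.getD score.toNat [] ++ [s]), st.2 + 1)
        else st)
      (List.replicate (kws.length + 1) [], (0 : Int))
    if st.2 = 0 then memory
    else
      let ranked := (PySem.List.pyRange (kws.length : Int) 0 (-1)).foldl
        (fun acc v => acc ++ PySem.List.sorted (st.1.getD v.toNat []) PySem.Str.len) []
      PySem.List.slice ranked none (some 100)

-- ===== PRECONDITION & SPEC =====
def Spec_filter_memory_by_keywords (memory : List String) (kws : List String) (out : List String) : Prop := out = filter_memory_by_keywords_alt memory kws
instance (memory : List String) (kws : List String) (out : List String) : Decidable (Spec_filter_memory_by_keywords memory kws out) := by unfold Spec_filter_memory_by_keywords; infer_instance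

-- ===== CLAIM (what is proved, stated in full; the proofs are below) =====
def Claim_equal_filter_memory_by_keywords : Prop := ∀ (memory : List String) (kws : List String), Dom_filter_memory_by_keywords memory kws → Spec_filter_memory_by_keywords memory kws (filter_memory_by_keywords memory kws)



-- ===== LEMMAS AND PROOFS =====
-- generic defs
def pvB2 {α : Type} (k2 : α → Int) (a b : α) : Bool := decide (k2 a < k2 b)
def pvBefore {α : Type} (k1 k2 : α → Int) (a b : α) : Bool :=
  decide (k1 a < k1 b) || (!decide (k1 b < k1 a) && decide (k2 a < k2 b))

lemma sorted2_eq_foldl {α : Type} (xs : List α) (k1 k2 : α → Int) :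
    PySem.List.sorted2 xs k1 k2 = xs.foldl (fun acc x => PySem.List.insertBy (pvBefore k1 k2) x acc) [] := rfl

lemma sorted_eq_foldl {α : Type} (xs : List α) (k2 : α → Int) :
    PySem.List.sorted xs k2 = xs.foldl (fun acc x => PySem.List.insertBy (pvB2 k2) x acc) [] := rfl

lemma insertBy_nil {α : Type} (bef : α → α → Bool) (x : α) : PySem.List.insertBy bef x [] = [x] := rfl

lemma insertBy_cons {α : Type} (bef : α → α → Bool) (x y : α) (ys : List α) :
    PySem.List.insertBy bef x (y :: ys) =
      if bef x y then x :: y :: ys else y :: PySem.List.insertBy bef x ys := rfl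

lemma insertBy_skip {α : Type} (bef : α → α → Bool) (x : α) :
    ∀ (A B : List α), (∀ a ∈ A, bef x a = false) →
      PySem.List.insertBy bef x (A ++ B) = A ++ PySem.List.insertBy bef x B := by
  intro A
  induction A with
  | nil => intro B _; simp
  | cons a A ih =>
      intro B h
      have ha : bef x a = false := h a (by simp)
      simp [insertBy_cons, ha, ih B (fun a' ha' => h a' (by simp [ha']))]

lemma insertBy_prefix {α : Type} (bef b2 : α → α → Bool) (x : α) :
    ∀ (C D : List α), (∀ c ∈ C, bef x c = b2 x c) → (∀ d ∈ D, bef x d = true) →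
      PySem.List.insertBy bef x (C ++ D) = PySem.List.insertBy b2 x C ++ D := by
  intro C
  induction C with
  | nil =>
      intro D _ hD
      cases D with
      | nil => simp [insertBy_nil]
      | cons d D => simp [insertBy_cons, hD d (by simp), insertBy_nil]
  | cons c C ih =>
      intro D hC hD
      have hc : bef x c = b2 x c := hC c (by simp)
      by_cases h : b2 x c = true
      · simp [insertBy_cons, hc, h]
      · have h' : b2 x c = false := by simpa using h
        simp [insertBy_cons, hc, h', ih D (fun c' hc' => hC c' (by simp [hc'])) hD]

lemma flatMap_congr_mem {α β : Type} {l : List α} {f g : α → List β}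
    (h : ∀ a ∈ l, f a = g a) : l.flatMap f = l.flatMap g := by
  induction l with
  | nil => rfl
  | cons a l ih =>
      simp [List.flatMap_cons, h a (by simp), ih (fun a' ha' => h a' (by simp [ha']))]

lemma insertBy_flatMap {α : Type} (k1 k2 : α → Int) (x : α) :
    ∀ (V : List Int) (B : Int → List α), V.Pairwise (· < ·) → k1 x ∈ V →
      (∀ v ∈ V, ∀ a ∈ B v, k1 a = v) →
      PySem.List.insertBy (pvBefore k1 k2) x (V.flatMap B) =
        V.flatMap (fun v => if v = k1 x then PySem.List.insertBy (pvB2 k2) x (B v) else B v) := by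
  intro V
  induction V with
  | nil => intro B _ hmem _; simp at hmem
  | cons v V ih =>
      intro B hpw hmem hB
      by_cases hv : v = k1 x
      · -- insert into the head bucket
        subst hv
        rw [List.flatMap_cons]
        rw [insertBy_prefix (pvBefore k1 k2) (pvB2 k2) x (B (k1 x)) (V.flatMap B)
            (by
              intro c hc
              have hk : k1 c = k1 x := hB (k1 x) (by simp) c hc
              simp [pvBefore, pvB2, hk])
            (by
              intro d hd
              obtain ⟨v', hv', hd'⟩ := List.mem_flatMap.mp hd
              have hk : k1 d = v' := hB v' (by simp [hv']) d hd'
              have hgt : k1 x < v' := (List.pairwise_cons.mp hpw).1 v' hv'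
              simp [pvBefore, hk, hgt])]
        rw [List.flatMap_cons, if_pos rfl]
        congr 1
        refine flatMap_congr_mem ?_
        intro v' hv'
        have hgt : k1 x < v' := (List.pairwise_cons.mp hpw).1 v' hv'
        rw [if_neg (by omega)]
      · -- skip the head bucket
        have hmem' : k1 x ∈ V := by
          rcases List.mem_cons.mp hmem with h | h
          · exact absurd h.symm hv
          · exact h
        have hlt : v < k1 x := by
          have := (List.pairwise_cons.mp hpw).1 (k1 x) hmem'
          exact this
        rw [List.flatMap_cons]
        rw [insertBy_skip (pvBefore k1 k2) x (B v) (V.flatMap B)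
            (by
              intro a ha
              have hk : k1 a = v := hB v (by simp) a ha
              simp [pvBefore, hk]
              omega)]
        rw [ih B (List.pairwise_cons.mp hpw).2 hmem'
            (fun v' hv' a ha => hB v' (by simp [hv']) a ha)]
        rw [List.flatMap_cons, if_neg hv]

lemma sorted_append_singleton {α : Type} (ys : List α) (x : α) (k2 : α → Int) :
    PySem.List.sorted (ys ++ [x]) k2 = PySem.List.insertBy (pvB2 k2) x (PySem.List.sorted ys k2) := by
  rw [sorted_eq_foldl, sorted_eq_foldl, List.foldl_append]
  rfl

-- THE bucket decomposition of the stable two-key sort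
lemma sorted2_eq_flatMap {α : Type} (k1 k2 : α → Int) (V : List Int)
    (hpw : V.Pairwise (· < ·)) :
    ∀ (l : List α), (∀ a ∈ l, k1 a ∈ V) →
      PySem.List.sorted2 l k1 k2 =
        V.flatMap (fun v => PySem.List.sorted (l.filter (fun a => k1 a == v)) k2) := by
  intro l
  induction l using List.reverseRecOn with
  | nil => intro _; simp [sorted2_eq_foldl, PySem.List.sorted]
  | append_singleton l x ih =>
      intro hmem
      have hml : ∀ a ∈ l, k1 a ∈ V := fun a ha => hmem a (by simp [ha])
      have hmx : k1 x ∈ V := hmem x (by simp)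
      rw [sorted2_eq_foldl, List.foldl_append]
      simp only [List.foldl_cons, List.foldl_nil]
      rw [← sorted2_eq_foldl, ih hml]
      rw [insertBy_flatMap k1 k2 x V _ hpw hmx
          (by
            intro v hv a ha
            have h1 : a ∈ List.filter (fun a => k1 a == v) l := (PySem.List.mem_sorted _ _ _ _).mp ha
            simpa using List.of_mem_filter h1)]
      refine flatMap_congr_mem ?_
      intro v hv
      rw [List.filter_append]
      by_cases h : k1 x = v
      · rw [if_pos h.symm]
        have : List.filter (fun a => k1 a == v) [x] = [x] := by simp [h]
        rw [this, sorted_append_singleton]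
      · rw [if_neg (fun hh => h hh.symm)]
        have : List.filter (fun a => k1 a == v) [x] = [] := by simp [h]
        rw [this, List.append_nil]

-- stable sort commutes with map
lemma insertBy_map {α β : Type} (bef : β → β → Bool) (f : α → β) (x : α) :
    ∀ (ys : List α), PySem.List.insertBy bef (f x) (ys.map f) =
      (PySem.List.insertBy (fun a b => bef (f a) (f b)) x ys).map f := by
  intro ys
  induction ys with
  | nil => simp [insertBy_nil]
  | cons y ys ih =>
      by_cases h : bef (f x) (f y) = true
      · simp [insertBy_cons, h]
      · have h' : bef (f x) (f y) = false := by simpa using h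
        simp [insertBy_cons, h', ih]

lemma sorted_map {α β : Type} (f : α → β) (key : β → Int) :
    ∀ (l : List α) (acc : List α),
      (l.map f).foldl (fun acc x => PySem.List.insertBy (pvB2 key) x acc) (acc.map f) =
        (l.foldl (fun acc x => PySem.List.insertBy (pvB2 (fun a => key (f a))) x acc) acc).map f := by
  intro l
  induction l with
  | nil => intro acc; simp
  | cons a l ih =>
      intro acc
      simp only [List.map_cons, List.foldl_cons]
      rw [show PySem.List.insertBy (pvB2 key) (f a) (acc.map f) =
            (PySem.List.insertBy (pvB2 (fun a => key (f a))) a acc).map f from insertBy_map _ f a acc]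
      exact ih _

lemma sorted_map' {α β : Type} (f : α → β) (key : β → Int) (l : List α) :
    PySem.List.sorted (l.map f) key = (PySem.List.sorted l (fun a => key (f a))).map f := by
  rw [sorted_eq_foldl, sorted_eq_foldl]
  have := sorted_map f key l []
  simpa using this

-- score of a string
def pvSc (kws : List String) (s : String) : Int :=
  (kws.countP (fun k => PySem.Str.isIn k (PySem.Str.lower s)) : Int)

lemma score_eq (kws : List String) (s : String) :
    kws.foldl (fun c k => if PySem.Str.isIn k (PySem.Str.lower s) then c + 1 else c) (0 : Int) = pvSc kws s := by
  have := PySem.List.foldl_if_add_one (l := kws)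
    (p := fun k => PySem.Str.isIn k (PySem.Str.lower s)) (a := (0 : Int))
  simpa [pvSc] using this

lemma pvSc_nonneg (kws : List String) (s : String) : 0 ≤ pvSc kws s := by
  simp [pvSc]

lemma pvSc_le (kws : List String) (s : String) : pvSc kws s ≤ kws.length := by
  simp only [pvSc, Nat.cast_le]
  exact List.countP_le_length

-- A's scored list, in closed form
lemma scored_closed (kws : List String) (memory : List String) :
    memory.foldl (fun acc s =>
        if (kws.foldl (fun c k => if PySem.Str.isIn k (PySem.Str.lower s) then c + 1 else c) (0 : Int)) > 0
        then acc ++ [((kws.foldl (fun c k => if PySem.Str.isIn k (PySem.Str.lower s) then c + 1 else c) (0 : Int)), s)]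
        else acc) [] =
      (memory.filter (fun s => decide (0 < pvSc kws s))).map (fun s => (pvSc kws s, s)) := by
  rw [PySem.List.foldl_congr_mem
      (l := memory) (init := ([] : List (Int × String)))
      (f := fun acc s =>
        if (kws.foldl (fun c k => if PySem.Str.isIn k (PySem.Str.lower s) then c + 1 else c) (0 : Int)) > 0
        then acc ++ [((kws.foldl (fun c k => if PySem.Str.isIn k (PySem.Str.lower s) then c + 1 else c) (0 : Int)), s)]
        else acc)
      (g := fun acc s => if 0 < pvSc kws s then acc ++ [(pvSc kws s, s)] else acc)
      (by
        intro acc s _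
        simp only [score_eq])]
  have := PySem.List.foldl_append_ite (l := memory) (p := fun s => 0 < pvSc kws s)
    (f := fun s => (pvSc kws s, s)) (acc := ([] : List (Int × String)))
  simpa using this

-- B's loop with the score abbreviated (pointwise equal to the port's loop body)
def pvStep (kws : List String) (st : List (List String) × Int) (s : String) :
    List (List String) × Int :=
  if 0 < pvSc kws s then
    (st.1.set (pvSc kws s).toNat (st.1.getD (pvSc kws s).toNat [] ++ [s]), st.2 + 1)
  else st

lemma bstep_congr (kws memory : List String) :
    memory.foldl (fun (st : List (List String) × Int) s =>
        if (kws.foldl (fun c k => if PySem.Str.isIn k (PySem.Str.lower s) then c + 1 else c) (0 : Int)) > 0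
        then (st.1.set (kws.foldl (fun c k => if PySem.Str.isIn k (PySem.Str.lower s) then c + 1 else c) (0 : Int)).toNat
                ((st.1.getD (kws.foldl (fun c k => if PySem.Str.isIn k (PySem.Str.lower s) then c + 1 else c) (0 : Int)).toNat []) ++ [s]),
              st.2 + 1)
        else st)
      (List.replicate (kws.length + 1) [], (0 : Int)) =
    memory.foldl (pvStep kws) (List.replicate (kws.length + 1) [], (0 : Int)) := by
  apply PySem.List.foldl_congr_mem
  intro st s _
  simp only [score_eq, pvStep]

lemma binv (kws : List String) (m : List String) :
    (m.foldl (pvStep kws) (List.replicate (kws.length + 1) [], (0 : Int))).1.length = kws.length + 1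
    ∧ (m.foldl (pvStep kws) (List.replicate (kws.length + 1) [], (0 : Int))).2
        = ((m.filter (fun s => decide (0 < pvSc kws s))).length : Int)
    ∧ ∀ j : Nat, (m.foldl (pvStep kws) (List.replicate (kws.length + 1) [], (0 : Int))).1.getD j []
        = if 1 ≤ j ∧ j ≤ kws.length then m.filter (fun s => pvSc kws s == (j : Int)) else [] := by
  induction m using List.reverseRecOn with
  | nil =>
      refine ⟨by simp, by simp, ?_⟩
      intro j
      simp [List.getD_eq_getElem?_getD, List.getElem?_replicate]
      split_ifs <;> rfl
  | append_singleton m s ih =>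
      obtain ⟨h1, h2, h3⟩ := ih
      rw [List.foldl_append]
      simp only [List.foldl_cons, List.foldl_nil]
      by_cases hp : 0 < pvSc kws s
      · have hle := pvSc_le kws s
        set i := (pvSc kws s).toNat with hi_def
        have hiv : (i : Int) = pvSc kws s := Int.toNat_of_nonneg (le_of_lt hp)
        have hi1 : 1 ≤ i := by omega
        have hin : i ≤ kws.length := by omega
        have hilt : i < (m.foldl (pvStep kws) (List.replicate (kws.length + 1) [], (0 : Int))).1.length := by omega
        refine ⟨?_, ?_, ?_⟩
        · simp only [pvStep, if_pos hp, List.length_set]; exact h1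
        · simp only [pvStep, if_pos hp, h2, List.filter_append]
          simp [hp]
        · intro j
          simp only [pvStep, if_pos hp]
          rw [List.filter_append]
          by_cases hj : j = i
          · subst hj
            rw [List.getD_eq_getElem?_getD, List.getElem?_set_self hilt]
            simp only [Option.getD_some]
            rw [← hi_def, h3 i, if_pos ⟨hi1, hin⟩, if_pos ⟨hi1, hin⟩]
            simp [← hiv]
          · rw [List.getD_eq_getElem?_getD, List.getElem?_set_ne (by omega), ← List.getD_eq_getElem?_getD, h3 j]
            have hne : (pvSc kws s == (j : Int)) = false := by
              simp only [beq_eq_false_iff_ne, ne_eq]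
              intro h
              apply hj
              omega
            simp [hne]
      · simp only [pvStep, if_neg hp]
        refine ⟨h1, ?_, ?_⟩
        · rw [h2, List.filter_append]
          simp [hp]
        · intro j
          rw [h3 j, List.filter_append]
          by_cases hj : 1 ≤ j ∧ j ≤ kws.length
          · rw [if_pos hj, if_pos hj]
            have hne : (pvSc kws s == (j : Int)) = false := by
              simp only [beq_eq_false_iff_ne, ne_eq]
              have := pvSc_nonneg kws s
              intro h
              omega
            simp [hne]
          · rw [if_neg hj, if_neg hj]


lemma pyRange_desc (n : Nat) :
    PySem.List.pyRange (n : Int) 0 (-1) = (PySem.List.pyRange (-(n : Int)) 0 1).map (fun v => -v) := by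
  rw [PySem.List.pyRange_neg_one, PySem.List.pyRange_one, List.map_map]
  have h1 : ((n : Int) - 0).toNat = n := by omega
  have h2 : ((0 : Int) - -(n : Int)).toNat = n := by omega
  rw [h1, h2]
  apply List.map_congr_left
  intro k _
  simp
  omega

theorem filter_memory_by_keywords_spec : Claim_equal_filter_memory_by_keywords := by
  intro memory kws _
  unfold Spec_filter_memory_by_keywords
  by_cases hk : kws = []
  · simp [filter_memory_by_keywords, filter_memory_by_keywords_alt, hk]
  · simp only [filter_memory_by_keywords, filter_memory_by_keywords_alt, if_neg hk]
    rw [scored_closed, bstep_congr]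
    obtain ⟨hb1, hb2, hb3⟩ := binv kws memory
    rw [hb2]
    by_cases hF : memory.filter (fun s => decide (0 < pvSc kws s)) = []
    · rw [hF]
      simp
    · rw [if_neg (by simp [hF]), if_neg (by simp [hF])]
      -- truncate after proving the full ranked lists equal
      rw [PySem.List.slice_to _ (by norm_num), PySem.List.slice_to _ (by norm_num)]
      rw [List.map_take]
      congr 1
      -- A: bucket decomposition of the stable two-key sort
      rw [sorted2_eq_flatMap (fun (x : Int × String) => -x.1) (fun (x : Int × String) => PySem.Str.len x.2)
            (PySem.List.pyRange (-(kws.length : Int)) 0 1)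
            (PySem.List.pairwise_lt_pyRange_one _ _)
            _
            (by
              intro a ha
              obtain ⟨s, hs, rfl⟩ := List.mem_map.mp ha
              have hsF := List.mem_filter.mp hs
              have hpos : 0 < pvSc kws s := by simpa using hsF.2
              have hle := pvSc_le kws s
              refine PySem.List.mem_pyRange_one.mpr ⟨?_, ?_⟩ <;> simp <;> omega)]
      rw [List.map_flatMap]
      rw [PySem.List.foldl_append_eq_flatMap
            (g := fun (v : Int) => PySem.List.sorted
              ((memory.foldl (pvStep kws) (List.replicate (kws.length + 1) [], (0 : Int))).1.getD v.toNat [])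
              PySem.Str.len) _ []]
      rw [List.nil_append]
      -- B's buckets are the score-filtered sublists, by the loop invariant
      rw [flatMap_congr_mem (l := PySem.List.pyRange (kws.length : Int) 0 (-1))
            (g := fun v => PySem.List.sorted (memory.filter (fun s => pvSc kws s == v)) PySem.Str.len)
            (by
              intro v hv
              obtain ⟨hv1, hv2⟩ := PySem.List.mem_pyRange_neg_one.mp hv
              have hjv : ((v.toNat : Nat) : Int) = v := Int.toNat_of_nonneg (by omega)
              rw [hb3 v.toNat, if_pos ⟨by omega, by omega⟩, hjv])]
      -- A's buckets, string-level
      rw [flatMap_congr_mem (l := PySem.List.pyRange (-(kws.length : Int)) 0 1)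
            (g := fun v => PySem.List.sorted (memory.filter (fun s => pvSc kws s == -v)) PySem.Str.len)
            (by
              intro v hv
              obtain ⟨hv1, hv2⟩ := PySem.List.mem_pyRange_one.mp hv
              rw [List.filter_map]
              rw [sorted_map' (fun s => (pvSc kws s, s)) (fun x => PySem.Str.len x.2)]
              rw [List.map_map, List.filter_filter]
              simp only [Function.comp_def]
              rw [List.filter_congr
                    (q := fun s => pvSc kws s == -v)
                    (by
                      intro s _
                      by_cases h : pvSc kws s = -v
                      · have h2 : -pvSc kws s = v := by omega
                        have h3 : (0 : Int) < pvSc kws s := by omega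
                        simp [h]
                        exact hv2
                      · have h2 : ¬(-pvSc kws s = v) := by omega
                        have e1 : (-pvSc kws s == v) = false := by simpa using h2
                        have e2 : (pvSc kws s == -v) = false := by simpa using h
                        simp [e1, e2])]
              simp [PySem.Str.len_eq]
              rw [show PySem.Str.len = fun (a : String) => ((a.length : Int)) from
                    funext fun a => PySem.Str.len_eq a])]
      -- reindex the descending score range as the ascending key range
      rw [pyRange_desc, List.flatMap_map]
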